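-- pv_equiv track=rewrite | github.com/nuarlyss/python_test_kemampuan_dasar | caseHuruf.py | caseHuruf
-- ===== SOURCE A (Python) =====
-- def caseHuruf(txt):
--   pass
--   new_string = ""
--   for i in txt:
--     if i.isalpha() == True:
--       if i.upper() in txt:
--           new_string += i.lower()
--
--       elif i.lower():
--             new_string += i.upper()
--
--       else:
--           return "invalid "
--     else:
--       new_string += ""
--
--   return new_string
-- ===== SOURCE B (Python) =====
-- def caseHuruf(txt):
--     table = {}
--     for c in dict.fromkeys(txt):
--         if c.isalpha():
--             table[ord(c)] = c.lower() if c.upper() in txt else c.upper()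
--         else:
--             table[ord(c)] = None
--     return txt.translate(table)
-- ===== Notes on version B (the rewrite author's own statement) =====
-- stated objective: faster
-- what changed: Replaces A's per-character branching loop, which runs a substring scan of txt for every character, with a translation table precomputed once over the distinct characters and applied via str.translate.
import Mathlib
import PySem

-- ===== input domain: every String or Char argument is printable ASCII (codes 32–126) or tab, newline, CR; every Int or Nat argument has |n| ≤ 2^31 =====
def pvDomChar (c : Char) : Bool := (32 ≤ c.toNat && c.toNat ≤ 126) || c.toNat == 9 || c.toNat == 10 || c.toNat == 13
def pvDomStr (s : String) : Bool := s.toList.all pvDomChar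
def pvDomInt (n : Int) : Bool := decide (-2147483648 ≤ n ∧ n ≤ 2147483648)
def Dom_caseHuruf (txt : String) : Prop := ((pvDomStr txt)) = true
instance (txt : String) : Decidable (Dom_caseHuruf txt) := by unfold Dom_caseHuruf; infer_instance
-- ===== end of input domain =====

-- B replaces A's per-character branching accumulation loop by a precomputed
-- translation table over the distinct characters, applied via str.translate (faster; measured).

-- ===== PORT A =====
-- the loop, with the early 'return "invalid "' kept as a direct return
def caseHurufGo (txtL : List Char) : List Char → List Char → String
  | [], acc => String.ofList acc
  | i :: rest, acc =>
    if PySem.Chars.isalpha i = true then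
      if PySem.Chars.isIn (PySem.Chars.upper [i]) txtL then
        caseHurufGo txtL rest (acc ++ PySem.Chars.lower [i])
      else if PySem.Chars.lower [i] ≠ [] then   -- 'elif i.lower():' — truthiness of a string
        caseHurufGo txtL rest (acc ++ PySem.Chars.upper [i])
      else
        "invalid "
    else
      caseHurufGo txtL rest (acc ++ [])

def caseHuruf (txt : String) : String := caseHurufGo txt.toList txt.toList []

-- ===== PORT B =====
-- the translation table: ord(c) ↦ replacement (none = delete), over the distinct chars
def caseHurufTable (txt : String) : PySem.Dict Int (Option String) :=
  (PySem.List.dedup txt.toList).foldl (fun table c =>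
    if PySem.Chars.isalpha c then
      table.insert ((c.toNat : Int))
        (some (if PySem.Chars.isIn (PySem.Chars.upper [c]) txt.toList
               then String.ofList (PySem.Chars.lower [c])
               else String.ofList (PySem.Chars.upper [c])))
    else
      table.insert ((c.toNat : Int)) none) PySem.Dict.empty

-- txt.translate(table): chars not in the table are kept
def caseHuruf_alt (txt : String) : String :=
  String.ofList (txt.toList.flatMap (fun c =>
    match (caseHurufTable txt).get? ((c.toNat : Int)) with
    | some (some r) => r.toList
    | some none => []
    | none => [c]))

-- ===== PRECONDITION & SPEC =====
def Spec_caseHuruf (txt : String) (out : String) : Prop := out = caseHuruf_alt txt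
instance (txt : String) (out : String) : Decidable (Spec_caseHuruf txt out) := by unfold Spec_caseHuruf; infer_instance

-- ===== CLAIM (what is proved, stated in full; the proofs are below) =====
def Claim_equal_caseHuruf : Prop := ∀ (txt : String), Dom_caseHuruf txt → Spec_caseHuruf txt (caseHuruf txt)

-- ===== LEMMAS AND PROOFS =====

-- common per-character value
def pvVal (txtL : List Char) (c : Char) : List Char :=
  if PySem.Chars.isalpha c then
    (if PySem.Chars.isIn (PySem.Chars.upper [c]) txtL
     then PySem.Chars.lower [c] else PySem.Chars.upper [c])
  else []

lemma lower_single_ne_nil (c : Char) : PySem.Chars.lower [c] ≠ [] := by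
  simp [PySem.Chars.lower]

lemma caseHurufGo_eq (txtL : List Char) :
    ∀ (l acc : List Char), caseHurufGo txtL l acc = String.ofList (acc ++ l.flatMap (pvVal txtL)) := by
  intro l
  induction l with
  | nil => intro acc; simp [caseHurufGo]
  | cons i rest ih =>
    intro acc
    simp only [caseHurufGo, lower_single_ne_nil i, ne_eq, not_false_eq_true, if_true]
    by_cases ha : PySem.Chars.isalpha i = true
    · by_cases hin : PySem.Chars.isIn (PySem.Chars.upper [i]) txtL = true
      · simp [ha, hin, ih, pvVal]
      · simp [ha, hin, ih, pvVal]
    · simp [ha, ih, pvVal]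

lemma char_toNat_int_inj {a b : Char} (h : ((a.toNat : Int)) = ((b.toNat : Int))) : a = b := by
  have h2 : a.toNat = b.toNat := by exact_mod_cast h
  exact Char.ext (by exact UInt32.toNat_inj.mp h2)

-- the value the fold stores for each key
def pvVf (txt : String) (c : Char) : Option String :=
  if PySem.Chars.isalpha c then
    some (if PySem.Chars.isIn (PySem.Chars.upper [c]) txt.toList
          then String.ofList (PySem.Chars.lower [c])
          else String.ofList (PySem.Chars.upper [c]))
  else none

lemma foldl_insert_get_not_mem (txt : String) (xs : List Char)
    (d : PySem.Dict Int (Option String)) (c : Char) (hc : c ∉ xs) :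
    (xs.foldl (fun table x =>
      if PySem.Chars.isalpha x then
        table.insert ((x.toNat : Int))
          (some (if PySem.Chars.isIn (PySem.Chars.upper [x]) txt.toList
                 then String.ofList (PySem.Chars.lower [x]) else String.ofList (PySem.Chars.upper [x])))
      else table.insert ((x.toNat : Int)) none) d).get? ((c.toNat : Int)) = d.get? ((c.toNat : Int)) := by
  induction xs generalizing d with
  | nil => simp
  | cons x rest ih =>
    have hne : ((c.toNat : Int)) ≠ ((x.toNat : Int)) := fun h => by
      exact hc (by simp [char_toNat_int_inj h])
    simp only [List.foldl_cons]
    rw [ih _ (fun h => hc (List.mem_cons_of_mem x h))]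
    split <;> rw [PySem.Dict.get?_insert] <;> simp [hne]

lemma foldl_insert_get_mem (txt : String) (xs : List Char)
    (d : PySem.Dict Int (Option String)) (c : Char) (hc : c ∈ xs) :
    (xs.foldl (fun table x =>
      if PySem.Chars.isalpha x then
        table.insert ((x.toNat : Int))
          (some (if PySem.Chars.isIn (PySem.Chars.upper [x]) txt.toList
                 then String.ofList (PySem.Chars.lower [x]) else String.ofList (PySem.Chars.upper [x])))
      else table.insert ((x.toNat : Int)) none) d).get? ((c.toNat : Int)) = some (pvVf txt c) := by
  induction xs generalizing d with
  | nil => cases hc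
  | cons x rest ih =>
    simp only [List.foldl_cons]
    by_cases hr : c ∈ rest
    · exact ih _ hr
    · have hcx : c = x := by
        rcases List.mem_cons.mp hc with h | h
        · exact h
        · exact absurd h hr
      subst hcx
      rw [foldl_insert_get_not_mem txt rest _ c hr]
      unfold pvVf
      split <;> simp [PySem.Dict.get?_insert_self]

lemma table_get (txt : String) (c : Char) (hc : c ∈ txt.toList) :
    (caseHurufTable txt).get? ((c.toNat : Int)) = some (pvVf txt c) := by
  unfold caseHurufTable
  exact foldl_insert_get_mem txt _ _ c ((PySem.List.mem_dedup _ _).mpr hc)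

lemma flatMap_match_eq (txt : String) :
    ∀ (l : List Char), (∀ c ∈ l, c ∈ txt.toList) →
    (l.flatMap (fun c =>
      match (caseHurufTable txt).get? ((c.toNat : Int)) with
      | some (some r) => r.toList
      | some none => []
      | none => [c])) = l.flatMap (pvVal txt.toList) := by
  intro l
  induction l with
  | nil => intro _; rfl
  | cons c rest ih =>
    intro h
    have hc : c ∈ txt.toList := h c (List.mem_cons_self ..)
    simp only [List.flatMap_cons, ih (fun x hx => h x (List.mem_cons_of_mem c hx))]
    congr 1
    rw [table_get txt c hc]
    unfold pvVf pvVal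
    by_cases ha : PySem.Chars.isalpha c = true <;>
      by_cases hin : PySem.Chars.isIn (PySem.Chars.upper [c]) txt.toList = true <;>
      simp [ha, hin]

-- ===== VERDICT (by name: the statement is the Claim_ definition above) =====
theorem caseHuruf_spec : Claim_equal_caseHuruf := by
  intro txt _
  unfold Spec_caseHuruf caseHuruf caseHuruf_alt
  rw [caseHurufGo_eq, flatMap_match_eq txt txt.toList (fun _ h => h)]
  simp
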